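-- pv_equiv track=rewrite | github.com/Everlastingwind/PLAB_B | scripts/dem_result_to_slim_match.py | _hero_internal_from_unit
-- ===== SOURCE A (Python) =====
-- from typing import Any, Dict, List, Mapping, Optional, Set, Tuple
--
-- def _hero_internal_from_unit(unit: str) -> str:
--     """
--     CDOTA_Unit_Hero_* → dotaconstants 风格 npc 名后缀（小写 snake_case）。
--
--     Valve 类名里既有 ``ChaosKnight`` 连体，也有 ``Shadow_Demon`` / ``Primal_Beast``
--     用下划线分词。若整串按驼峰切分，会在已有 ``_`` 前再插 ``_``，得到
--     ``shadow__demon``，与战斗日志 / 购买的 ``npc_dota_hero_shadow_demon`` 不一致，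
--     导致伤害、装备、技能近似全部落空。
--     """
--     u = unit.replace("CDOTA_Unit_Hero_", "").strip()
--     if not u:
--         return ""
--
--     def _camel_token_to_snake(token: str) -> str:
--         s: List[str] = []
--         for i, c in enumerate(token):
--             if c.isupper() and i > 0:
--                 s.append("_")
--             s.append(c.lower())
--         return "".join(s)
--
--     parts = [p for p in u.split("_") if p]
--     if not parts:
--         return ""
--     return "_".join(_camel_token_to_snake(p) for p in parts)
-- ===== SOURCE B (Python) =====
-- def _hero_internal_from_unit(unit: str) -> str:
--     """Single left-to-right pass with a lazy separator instead of a split/map/join pipeline."""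
--     u = unit.replace("CDOTA_Unit_Hero_", "").strip()
--     out = []
--     started = False   # some character already emitted
--     pending = False   # an underscore separator is owed before the next character
--     for c in u:
--         if c == "_":
--             if started:
--                 pending = True
--         else:
--             if pending:
--                 out.append("_")
--                 pending = False
--             elif started and c.isupper():
--                 out.append("_")
--             out.append(c.lower())
--             started = True
--     return "".join(out)
-- ===== Notes on version B (the rewrite author's own statement) =====
-- stated objective: alternative
-- what changed: Replaces A's underscore-split / filter / per-token camel-split / underscore-join pipeline by a single left-to-right pass over the stripped string with a lazy separator (started/pending flags), emitting the snake_case output directly.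
import Mathlib
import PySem

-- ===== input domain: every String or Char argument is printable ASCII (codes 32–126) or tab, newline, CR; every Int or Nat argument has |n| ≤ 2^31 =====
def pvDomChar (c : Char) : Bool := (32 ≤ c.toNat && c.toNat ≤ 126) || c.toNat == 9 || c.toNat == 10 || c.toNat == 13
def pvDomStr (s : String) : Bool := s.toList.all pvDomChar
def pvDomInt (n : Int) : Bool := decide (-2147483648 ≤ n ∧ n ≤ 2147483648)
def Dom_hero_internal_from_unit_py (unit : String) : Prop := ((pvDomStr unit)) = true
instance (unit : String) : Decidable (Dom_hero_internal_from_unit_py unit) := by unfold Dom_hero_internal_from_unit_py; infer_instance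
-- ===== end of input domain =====

-- B replaces A's split/filter/camel-map/join pipeline by a single left-to-right pass with a
-- lazy underscore separator (objective: alternative decomposition, same asymptotic cost).

-- ===== PORT A =====
-- inner helper _camel_token_to_snake: Python builds a list of one-char strings and ''.joins it;
-- ported as a List Char accumulator (exact: each appended piece is a single ASCII char)
def pvCamel (token : List Char) : List Char :=
  (PySem.List.enumerate token).foldl
    (fun s ic =>
      (if PySem.Chars.isupper ic.2 && decide (0 < ic.1) then s ++ ['_'] else s)
        ++ [PySem.Chars.lowerChar ic.2]) []

def hero_internal_from_unit_py (unit : String) : String :=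
  let u := PySem.Str.strip (PySem.Str.replace unit "CDOTA_Unit_Hero_" "")
  if u = "" then ""
  else
    -- u.split("_") with the nonempty literal separator, then the filtering comprehension
    let parts := (PySem.Chars.splitOn u.toList ['_']).filter (fun p => p ≠ [])
    if parts = [] then ""
    else String.ofList (PySem.Chars.join ['_'] (parts.map pvCamel))

-- ===== PORT B =====
def pvHeroLoop : List Char → Bool → Bool → List Char → List Char
  | [], _, _, out => out
  | c :: rest, started, pending, out =>
    if c = '_' then
      pvHeroLoop rest started (if started then true else pending) out
    else
      let out2 := if pending then out ++ ['_']
                  else if started && PySem.Chars.isupper c then out ++ ['_'] else out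
      pvHeroLoop rest true false (out2 ++ [PySem.Chars.lowerChar c])

def hero_internal_from_unit_py_alt (unit : String) : String :=
  let u := PySem.Str.strip (PySem.Str.replace unit "CDOTA_Unit_Hero_" "")
  String.ofList (pvHeroLoop u.toList false false [])

-- ===== PRECONDITION & SPEC =====
def Spec_hero_internal_from_unit_py (unit : String) (out : String) : Prop := out = hero_internal_from_unit_py_alt unit
instance (unit : String) (out : String) : Decidable (Spec_hero_internal_from_unit_py unit out) := by unfold Spec_hero_internal_from_unit_py; infer_instance

-- ===== CLAIM (what is proved, stated in full; the proofs are below) =====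
def Claim_equal_hero_internal_from_unit_py : Prop := ∀ (unit : String), Dom_hero_internal_from_unit_py unit → Spec_hero_internal_from_unit_py unit (hero_internal_from_unit_py unit)

-- ===== LEMMAS AND PROOFS =====

-- structural version of A's camel-case splitter
def pvCamelTail : List Char → List Char
  | [] => []
  | c :: rest =>
    (if PySem.Chars.isupper c then ['_'] else []) ++ PySem.Chars.lowerChar c :: pvCamelTail rest

def pvCamelL : List Char → List Char
  | [] => []
  | c :: rest => PySem.Chars.lowerChar c :: pvCamelTail rest

theorem pvCamel_tail_spec (t : List Char) : ∀ (acc : List Char) (i : Int), 1 ≤ i →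
    (PySem.List.enumerate t i).foldl
      (fun s ic =>
        (if PySem.Chars.isupper ic.2 && decide (0 < ic.1) then s ++ ['_'] else s)
          ++ [PySem.Chars.lowerChar ic.2]) acc = acc ++ pvCamelTail t := by
  induction t with
  | nil => intro acc i _; simp [PySem.List.enumerate, pvCamelTail]
  | cons c rest ih =>
    intro acc i hi
    rw [PySem.List.enumerate_cons, List.foldl_cons, ih _ (i + 1) (by omega)]
    have h0 : (0 : Int) < i := by omega
    simp only [decide_eq_true h0, Bool.and_true, pvCamelTail]
    by_cases hu : PySem.Chars.isupper c = true <;> simp [hu]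

theorem pvCamel_eq (t : List Char) : pvCamel t = pvCamelL t := by
  cases t with
  | nil => rfl
  | cons c rest =>
    unfold pvCamel
    rw [PySem.List.enumerate_cons, List.foldl_cons,
      show ((0:Int)+1) = 1 from rfl, pvCamel_tail_spec rest _ 1 le_rfl]
    simp [pvCamelL]

theorem pvCamelTail_append (ys : List Char) (c : Char) :
    pvCamelTail (ys ++ [c])
      = pvCamelTail ys ++ ((if PySem.Chars.isupper c then ['_'] else []) ++ [PySem.Chars.lowerChar c]) := by
  induction ys with
  | nil => simp [pvCamelTail]
  | cons y ys ih => simp [pvCamelTail, ih]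

theorem pvCamelL_append (xs : List Char) (c : Char) (h : xs ≠ []) :
    pvCamelL (xs ++ [c])
      = pvCamelL xs ++ ((if PySem.Chars.isupper c then ['_'] else []) ++ [PySem.Chars.lowerChar c]) := by
  cases xs with
  | nil => exact absurd rfl h
  | cons x ys => simp [pvCamelL, pvCamelTail_append]

-- structural version of str.split('_')
def pvSpl : List Char → List Char → List (List Char)
  | [], cur => [cur.reverse]
  | c :: rest, cur => if c = '_' then cur.reverse :: pvSpl rest [] else pvSpl rest (c :: cur)

theorem pvSplitOn_go_eq : ∀ (fuel : Nat) (l cur : List Char) (acc : List (List Char)),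
    l.length < fuel →
    PySem.Chars.splitOn.go ['_'] fuel l cur acc = acc.reverse ++ pvSpl l cur := by
  intro fuel
  induction fuel with
  | zero => intro l cur acc h; omega
  | succ n ih =>
    intro l cur acc h
    cases l with
    | nil => simp [PySem.Chars.splitOn.go, pvSpl]
    | cons c rest =>
      by_cases hc : c = '_'
      · subst hc
        have hp : List.isPrefixOf ['_'] ('_' :: rest) = true := by
          simp [List.isPrefixOf]
        simp only [PySem.Chars.splitOn.go, hp, if_pos, List.length_cons, List.length_nil,
          List.drop_succ_cons, List.drop_zero]
        rw [ih rest [] (cur.reverse :: acc) (by simpa using Nat.lt_of_succ_lt_succ h)]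
        simp [pvSpl]
      · have hp : List.isPrefixOf ['_'] (c :: rest) = false := by
          simp [List.isPrefixOf]; exact fun he => hc he.symm
        simp only [PySem.Chars.splitOn.go, hp, Bool.false_eq_true, if_neg, not_false_iff]
        rw [ih rest (c :: cur) acc (by simpa using Nat.lt_of_succ_lt_succ h)]
        simp [pvSpl, hc]

theorem pvSplitOn_eq (l : List Char) : PySem.Chars.splitOn l ['_'] = pvSpl l [] := by
  unfold PySem.Chars.splitOn
  simpa using pvSplitOn_go_eq (l.length + 1) l [] [] (by omega)

-- B's loop only appends to `out`
theorem pvHeroLoop_out (l : List Char) : ∀ (s p : Bool) (out : List Char),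
    pvHeroLoop l s p out = out ++ pvHeroLoop l s p [] := by
  induction l with
  | nil => intro s p out; simp [pvHeroLoop]
  | cons c rest ih =>
    intro s p out
    by_cases hc : c = '_'
    · simp only [pvHeroLoop, if_pos hc]
      exact ih _ _ _
    · simp only [pvHeroLoop, if_neg hc]
      rw [ih true false, ih true false
        ((if p then [] ++ ['_'] else if s && PySem.Chars.isupper c then [] ++ ['_'] else [])
          ++ [PySem.Chars.lowerChar c])]
      by_cases hp : p = true <;> by_cases hu : (s && PySem.Chars.isupper c) = true <;>
        simp [hp, hu, List.append_assoc]

-- A's pipeline on the tail, written on lists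
def pvF (l cur : List Char) : List Char :=
  PySem.Chars.join ['_'] (((pvSpl l cur).filter (fun p => p ≠ [])).map pvCamelL)

theorem pvJoin_underscore_cons (x : List Char) (xs : List (List Char)) :
    PySem.Chars.join ['_'] (x :: xs)
      = x ++ (if xs = [] then [] else '_' :: PySem.Chars.join ['_'] xs) := by
  cases xs with
  | nil => simp [PySem.Chars.join, List.intercalate]
  | cons y ys => simp [PySem.Chars.join, List.intercalate, List.intersperse]

theorem pvSpl_filter_ne_nil : ∀ (l cur : List Char), cur ≠ [] →
    (pvSpl l cur).filter (fun p => p ≠ []) ≠ [] := by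
  intro l
  induction l with
  | nil =>
    intro cur hcur
    show ([cur.reverse].filter (fun p => p ≠ [])) ≠ []
    rw [List.filter_cons_of_pos (by simpa using hcur)]
    simp
  | cons d ds ih =>
    intro cur hcur
    by_cases hd : d = '_'
    · show (((if d = '_' then cur.reverse :: pvSpl ds [] else pvSpl ds (d :: cur))).filter
        (fun p => p ≠ [])) ≠ []
      rw [if_pos hd, List.filter_cons_of_pos (by simpa using hcur)]
      simp
    · show (((if d = '_' then cur.reverse :: pvSpl ds [] else pvSpl ds (d :: cur))).filter
        (fun p => p ≠ [])) ≠ []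
      rw [if_neg hd]
      exact ih (d :: cur) (by simp)

theorem pvF_sep (rest cur : List Char) (hcur : cur ≠ []) :
    pvF ('_' :: rest) cur
      = pvCamelL cur.reverse
        ++ (if (pvSpl rest []).filter (fun p => p ≠ []) = [] then [] else '_' :: pvF rest []) := by
  unfold pvF
  rw [show pvSpl ('_' :: rest) cur = cur.reverse :: pvSpl rest [] from by simp [pvSpl],
    List.filter_cons_of_pos (by simpa using hcur), List.map_cons, pvJoin_underscore_cons]
  by_cases hE : (pvSpl rest []).filter (fun p => p ≠ []) = []
  · rw [hE]; simp
  · rw [if_neg (by simpa [List.map_eq_nil_iff] using hE), if_neg hE]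

-- the main invariant: A's pipeline equals B's loop, in each of the three reachable states
theorem pvMain (l : List Char) :
    (∀ cur, cur ≠ [] → pvF l cur = pvCamelL cur.reverse ++ pvHeroLoop l true false [])
    ∧ pvF l [] = pvHeroLoop l false false []
    ∧ pvHeroLoop l true true []
        = (if (pvSpl l []).filter (fun p => p ≠ []) = [] then [] else '_' :: pvF l []) := by
  induction l with
  | nil =>
    refine ⟨fun cur hcur => ?_, ?_, ?_⟩
    · show pvF [] cur = pvCamelL cur.reverse ++ []
      unfold pvF
      rw [show pvSpl [] cur = [cur.reverse] from rfl,
        List.filter_cons_of_pos (by simpa using hcur)]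
      simp [PySem.Chars.join, List.intercalate]
    · rfl
    · rfl
  | cons c rest ih =>
    obtain ⟨iha, ihb, ihc⟩ := ih
    by_cases hc : c = '_'
    · subst hc
      have hsp : pvSpl ('_' :: rest) [] = [] :: pvSpl rest [] := by simp [pvSpl]
      have hb : pvF ('_' :: rest) [] = pvF rest [] := by
        unfold pvF
        rw [hsp, List.filter_cons_of_neg (by simp)]
      refine ⟨fun cur hcur => ?_, ?_, ?_⟩
      · rw [pvF_sep rest cur hcur,
          show pvHeroLoop ('_' :: rest) true false [] = pvHeroLoop rest true true [] from by
            simp [pvHeroLoop],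
          ihc]
      · rw [hb, ihb]
        simp [pvHeroLoop]
      · rw [show pvHeroLoop ('_' :: rest) true true [] = pvHeroLoop rest true true [] from by
            simp [pvHeroLoop],
          ihc, hsp, List.filter_cons_of_neg (by simp), hb]
    · have hsp : pvSpl (c :: rest) [] = pvSpl rest [c] := by simp [pvSpl, hc]
      have hb : pvF (c :: rest) []
          = PySem.Chars.lowerChar c :: pvHeroLoop rest true false [] := by
        have h1 : pvF (c :: rest) [] = pvF rest [c] := by
          unfold pvF; rw [hsp]
        rw [h1, iha [c] (by simp)]
        simp [pvCamelL, pvCamelTail]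
      have hgb : pvHeroLoop (c :: rest) false false []
          = PySem.Chars.lowerChar c :: pvHeroLoop rest true false [] := by
        simp only [pvHeroLoop, if_neg hc, Bool.false_and, Bool.false_eq_true, if_false,
          List.nil_append]
        exact pvHeroLoop_out rest true false [PySem.Chars.lowerChar c]
      refine ⟨fun cur hcur => ?_, hb.trans hgb.symm, ?_⟩
      · have h1 : pvF (c :: rest) cur = pvF rest (c :: cur) := by
          unfold pvF
          rw [show pvSpl (c :: rest) cur = pvSpl rest (c :: cur) from by simp [pvSpl, hc]]
        rw [h1, iha (c :: cur) (by simp)]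
        have h2 : pvCamelL (c :: cur).reverse
            = pvCamelL cur.reverse
              ++ ((if PySem.Chars.isupper c then ['_'] else []) ++ [PySem.Chars.lowerChar c]) := by
          rw [List.reverse_cons]
          exact pvCamelL_append _ _ (by simp [hcur])
        have h3 : pvHeroLoop (c :: rest) true false []
            = ((if PySem.Chars.isupper c then ['_'] else []) ++ [PySem.Chars.lowerChar c])
              ++ pvHeroLoop rest true false [] := by
          simp only [pvHeroLoop, if_neg hc, Bool.true_and, Bool.false_eq_true, if_false]
          by_cases hu : PySem.Chars.isupper c = true
          · simp only [hu, if_true]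
            simpa using pvHeroLoop_out rest true false ['_', PySem.Chars.lowerChar c]
          · simp only [Bool.not_eq_true] at hu
            simp only [hu, Bool.false_eq_true, if_false, List.nil_append]
            exact pvHeroLoop_out rest true false [PySem.Chars.lowerChar c]
        rw [h2, h3, List.append_assoc]
      · have hg : pvHeroLoop (c :: rest) true true []
            = '_' :: PySem.Chars.lowerChar c :: pvHeroLoop rest true false [] := by
          simp only [pvHeroLoop, if_neg hc, if_pos, List.nil_append]
          simpa using pvHeroLoop_out rest true false ['_', PySem.Chars.lowerChar c]
        rw [hg, hb, if_neg (by rw [hsp]; exact pvSpl_filter_ne_nil rest [c] (by simp))]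

-- ===== VERDICT (by name: the statement is the Claim_ definition above) =====
theorem hero_internal_from_unit_py_spec : Claim_equal_hero_internal_from_unit_py := by
  intro unit _
  unfold Spec_hero_internal_from_unit_py
  simp only [hero_internal_from_unit_py, hero_internal_from_unit_py_alt]
  generalize PySem.Str.strip (PySem.Str.replace unit "CDOTA_Unit_Hero_" "") = u
  obtain ⟨a, b, _⟩ := pvMain u.toList
  by_cases h0 : u = ""
  · subst h0
    rfl
  · rw [if_neg h0, pvSplitOn_eq]
    by_cases hpr : (pvSpl u.toList []).filter (fun p => p ≠ []) = []
    · rw [if_pos hpr, ← b]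
      unfold pvF
      rw [hpr]
      rfl
    · rw [if_neg hpr, ← b]
      unfold pvF
      rw [List.map_congr_left fun x _ => pvCamel_eq x]
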